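-- pv_equiv track=rewrite | github.com/eswan18/advent | python/2024/2/b.py | is_line_safe
-- ===== SOURCE A (Python) =====
-- from itertools import pairwise
--
-- def is_line_safe(line: str | list[int], try_removing: bool = True) -> bool:
--     if isinstance(line, str):
--         numbers = [int(n) for n in line.split(" ")]
--     else:
--         numbers = line
--     deltas = [a - b for a, b in pairwise(numbers)]
--     if all(1 <= delta <= 3 for delta in deltas):
--         return True
--     if all(-3 <= delta <= -1 for delta in deltas):
--         return True
--     # If the line wasn't safe as-is, we can try removing some elements.
--     if try_removing:
--         for i in range(len(numbers)):
--             line_with_removal = numbers[0:i] + numbers[i+1:len(numbers)]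
--             if is_line_safe(line_with_removal, try_removing=False):
--                 return True
--     return False
-- ===== SOURCE B (Python) =====
-- def _suffix_all(flags):
--     # out[k] = all(flags[k:]), computed right-to-left
--     out = [True]
--     acc = True
--     for f in reversed(flags):
--         acc = acc and f
--         out.append(acc)
--     out.reverse()
--     return out
--
--
-- def is_line_safe(line, try_removing=True):
--     if isinstance(line, str):
--         numbers = [int(n) for n in line.split(" ")]
--     else:
--         numbers = line
--     n = len(numbers)
--     deltas = [numbers[k] - numbers[k + 1] for k in range(n - 1)]
--     up = [1 <= d <= 3 for d in deltas]
--     down = [-3 <= d <= -1 for d in deltas]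
--     if all(up) or all(down):
--         return True
--     if not try_removing:
--         return False
--     su = _suffix_all(up)
--     sd = _suffix_all(down)
--     pu = True  # all(up[:i-1]) while scanning i below
--     pd = True
--     for i in range(n):
--         if i == 0:
--             ok = su[1] or sd[1]
--         elif i == n - 1:
--             ok = pu or pd
--         else:
--             merged = deltas[i - 1] + deltas[i]
--             ok = (pu and 1 <= merged <= 3 and su[i + 1]) or \
--                  (pd and -3 <= merged <= -1 and sd[i + 1])
--         if ok:
--             return True
--         if i >= 1:
--             pu = pu and up[i - 1]
--             pd = pd and down[i - 1]
--     return False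
-- ===== Notes on version B (the rewrite author's own statement) =====
-- stated objective: alternative
-- what changed: A retries the full safety check on every one-element-removed copy of the list (slice + recursive re-scan per index); B builds prefix/suffix monotone-run tables over the deltas once and decides each removal from the tables in a single scan.
import Mathlib
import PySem

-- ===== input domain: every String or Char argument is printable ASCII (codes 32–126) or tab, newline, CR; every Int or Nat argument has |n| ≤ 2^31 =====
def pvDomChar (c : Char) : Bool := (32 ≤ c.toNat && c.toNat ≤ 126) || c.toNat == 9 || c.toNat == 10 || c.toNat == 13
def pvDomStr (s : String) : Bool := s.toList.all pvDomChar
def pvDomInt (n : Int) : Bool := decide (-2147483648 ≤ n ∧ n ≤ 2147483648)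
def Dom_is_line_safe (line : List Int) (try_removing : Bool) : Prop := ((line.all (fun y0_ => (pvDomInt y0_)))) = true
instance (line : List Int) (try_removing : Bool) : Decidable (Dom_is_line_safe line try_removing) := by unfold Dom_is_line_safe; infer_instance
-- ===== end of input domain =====

-- B replaces A's try-every-removal recursion (slice + full re-check per removal index)
-- by a single scan that decides each removal from prefix/suffix monotone-run tables
-- over the deltas (an alternative algorithm; same return value).

-- ===== PORT A =====
-- literal transliteration of Source A (list branch of the str|list parameter; no mutation)
def is_line_safe (line : List Int) (try_removing : Bool) : Bool :=
  let deltas := List.zipWith (fun a b => a - b) line line.tail  -- pairwise(numbers)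
  if deltas.all (fun d => decide (1 ≤ d) && decide (d ≤ 3)) then true
  else if deltas.all (fun d => decide (-3 ≤ d) && decide (d ≤ -1)) then true
  else if h : try_removing = true then
    (PySem.List.pyRange 0 (line.length : Int) 1).any (fun i =>
      is_line_safe (PySem.List.slice line (some 0) (some i) ++
                    PySem.List.slice line (some (i + 1)) (some (line.length : Int))) false)
  else false
termination_by (if try_removing then 1 else 0)
decreasing_by simp [h]

-- ===== PORT B =====
-- _suffix_all from Source B: out[k] = all(flags[k:]), built right-to-left then reversed
def suffixAll (flags : List Bool) : List Bool :=
  let p := flags.reverse.foldl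
    (fun (p : List Bool × Bool) f => (p.1 ++ [p.2 && f], p.2 && f)) ([true], true)
  p.1.reverse

-- the final `for i in range(n)` loop of Source B, with its early `return True`
-- (all list indexing in Source B is in range, so getD is exact there)
def altLoop (n : Nat) (deltas : List Int) (up down su sd : List Bool) :
    Nat → Bool → Bool → Bool
  | i, pu, pd =>
    if i < n then
      let ok :=
        if i = 0 then su.getD 1 false || sd.getD 1 false
        else if i = n - 1 then pu || pd
        else
          let merged := deltas.getD (i - 1) 0 + deltas.getD i 0
          (pu && (decide (1 ≤ merged) && decide (merged ≤ 3)) && su.getD (i + 1) false) ||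
          (pd && (decide (-3 ≤ merged) && decide (merged ≤ -1)) && sd.getD (i + 1) false)
      if ok then true
      else altLoop n deltas up down su sd (i + 1)
             (if 1 ≤ i then pu && up.getD (i - 1) false else pu)
             (if 1 ≤ i then pd && down.getD (i - 1) false else pd)
    else false
termination_by i _ _ => n - i

def is_line_safe_alt (line : List Int) (try_removing : Bool) : Bool :=
  let n := line.length
  let deltas := (List.range (n - 1)).map (fun k => line.getD k 0 - line.getD (k + 1) 0)
  let up := deltas.map (fun d => decide (1 ≤ d) && decide (d ≤ 3))
  let down := deltas.map (fun d => decide (-3 ≤ d) && decide (d ≤ -1))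
  if up.all id || down.all id then true
  else if !try_removing then false
  else
    let su := suffixAll up
    let sd := suffixAll down
    altLoop n deltas up down su sd 0 true true

-- ===== PRECONDITION & SPEC =====
def Spec_is_line_safe (line : List Int) (try_removing : Bool) (out : Bool) : Prop := out = is_line_safe_alt line try_removing
instance (line : List Int) (try_removing : Bool) (out : Bool) : Decidable (Spec_is_line_safe line try_removing out) := by unfold Spec_is_line_safe; infer_instance

-- ===== CLAIM (what is proved, stated in full; the proofs are below) =====
def Claim_equal_is_line_safe : Prop := ∀ (line : List Int) (try_removing : Bool), Dom_is_line_safe line try_removing → Spec_is_line_safe line try_removing (is_line_safe line try_removing)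

-- ===== LEMMAS AND PROOFS =====

-- the deltas list, recursively
def dts : List Int → List Int
  | a :: b :: t => (a - b) :: dts (b :: t)
  | _ => []

def upP (d : Int) : Bool := decide (1 ≤ d) && decide (d ≤ 3)
def downP (d : Int) : Bool := decide (-3 ≤ d) && decide (d ≤ -1)

theorem dts_eq_zipWith (l : List Int) :
    List.zipWith (fun a b => a - b) l l.tail = dts l := by
  match l with
  | [] => rfl
  | [a] => rfl
  | a :: b :: t =>
    show (a - b) :: List.zipWith _ (b :: t) t = _
    have ih := dts_eq_zipWith (b :: t)
    simp only [List.tail_cons] at ih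
    rw [ih]; rfl

theorem length_dts (l : List Int) : (dts l).length = l.length - 1 := by
  match l with
  | [] => rfl
  | [a] => rfl
  | a :: b :: t => simp [dts, length_dts (b :: t)]

theorem dts_eq_rangeMap (l : List Int) :
    (List.range (l.length - 1)).map (fun k => l.getD k 0 - l.getD (k + 1) 0) = dts l := by
  rw [← dts_eq_zipWith]
  apply List.ext_getElem
  · simp
  · intro k h1 h2
    simp only [List.length_zipWith, List.length_tail, lt_min_iff] at h2
    have hk1 : k < l.length := by omega
    have hk2 : k + 1 < l.length := by omega
    simp [List.getElem_zipWith, List.getElem_tail, List.getD_eq_getElem?_getD,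
      List.getElem?_eq_getElem, hk1, hk2]

-- proof-side model of _suffix_all
def sufList : List Bool → List Bool
  | [] => [true]
  | f :: t => (f && (sufList t).headI) :: sufList t

theorem sufList_headI (t : List Bool) : (sufList t).headI = t.all id := by
  induction t with
  | nil => rfl
  | cons f t ih => simp [sufList, ih]

def tailPart : List Bool → Bool → List Bool
  | [], _ => []
  | f :: t, acc => (acc && f) :: tailPart t (acc && f)

theorem foldl_suffix_aux (rl : List Bool) (out : List Bool) (acc : Bool) :
    rl.foldl (fun (p : List Bool × Bool) f => (p.1 ++ [p.2 && f], p.2 && f)) (out, acc) =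
      (out ++ tailPart rl acc, acc && rl.all id) := by
  induction rl generalizing out acc with
  | nil => simp [tailPart]
  | cons f t ih => simp [tailPart, ih, Bool.and_assoc]

theorem tailPart_append (a : List Bool) (f : Bool) (acc : Bool) :
    tailPart (a ++ [f]) acc = tailPart a acc ++ [acc && a.all id && f] := by
  induction a generalizing acc with
  | nil => simp [tailPart]
  | cons g t ih => simp [tailPart, ih, Bool.and_assoc]

theorem suffixAll_eq_sufList (flags : List Bool) : suffixAll flags = sufList flags := by
  induction flags with
  | nil => rfl
  | cons f t ih =>
    unfold suffixAll at *
    simp only [List.reverse_cons, foldl_suffix_aux, tailPart_append] at *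
    simp only [Bool.true_and, List.all_reverse] at *
    rw [← List.append_assoc, List.reverse_append, ih]
    simp [sufList, sufList_headI, Bool.and_comm]

theorem sufList_getD (t : List Bool) (k : Nat) (hk : k ≤ t.length) :
    (sufList t).getD k false = (t.drop k).all id := by
  induction t generalizing k with
  | nil =>
    have : k = 0 := Nat.le_zero.mp hk
    subst this; rfl
  | cons f t ih =>
    cases k with
    | zero => simp [sufList, sufList_headI]
    | succ k => simpa [sufList] using ih k (by simpa using hk)

-- delta decomposition under one-element removal
theorem dts_tail (a b : Int) (t : List Int) : dts (b :: t) = (dts (a :: b :: t)).drop 1 := by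
  rfl

theorem dts_dropLast (l : List Int) : dts l.dropLast = (dts l).dropLast := by
  match l with
  | [] => rfl
  | [a] => rfl
  | [a, b] => rfl
  | a :: b :: c :: t =>
    have := dts_dropLast (b :: c :: t)
    simp only [dts, List.dropLast_cons_of_ne_nil, List.cons_ne_nil, ne_eq,
      not_false_iff] at *
    simp [dts, this]

theorem dts_removal (l : List Int) (k : Nat) (h1 : 1 ≤ k) (h2 : k + 1 < l.length) :
    dts (l.take k ++ l.drop (k + 1)) =
      (dts l).take (k - 1) ++
        (((dts l).getD (k - 1) 0 + (dts l).getD k 0) :: (dts l).drop (k + 1)) := by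
  match l, k with
  | a :: b :: c :: t, 1 =>
    simp [dts]
  | a :: b :: t, (k + 2) =>
    have h2' : (k + 1) + 1 < (b :: t).length := by simpa using h2
    have ih := dts_removal (b :: t) (k + 1) (by omega) h2'
    have hne : (b :: t).take (k + 1) ++ (b :: t).drop (k + 2) = b :: (t.take k ++ t.drop (k + 1)) := by
      simp
    have hstep : dts (a :: ((b :: t).take (k + 1) ++ (b :: t).drop (k + 2))) =
        (a - b) :: dts ((b :: t).take (k + 1) ++ (b :: t).drop (k + 2)) := by
      rw [hne]; rfl
    calc dts ((a :: b :: t).take (k + 2) ++ (a :: b :: t).drop (k + 3))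
        = dts (a :: ((b :: t).take (k + 1) ++ (b :: t).drop (k + 2))) := by simp
      _ = (a - b) :: dts ((b :: t).take (k + 1) ++ (b :: t).drop (k + 2)) := hstep
      _ = _ := by
          rw [ih]
          simp [dts]

theorem is_line_safe_false (l : List Int) :
    is_line_safe l false = ((dts l).all upP || (dts l).all downP) := by
  rw [is_line_safe, dts_eq_zipWith]
  split_ifs <;> simp_all [upP, downP]

-- A's per-removal test, as a function of the removal index
def condA (l : List Int) (k : Nat) : Bool :=
  (dts (l.take k ++ l.drop (k + 1))).all upP || (dts (l.take k ++ l.drop (k + 1))).all downP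

theorem sliceRem (l : List Int) (k : Nat) :
    PySem.List.slice l (some 0) (some (k : Int)) ++
      PySem.List.slice l (some ((k : Int) + 1)) (some (l.length : Int)) =
    l.take k ++ l.drop (k + 1) := by
  rw [show ((k : Int) + 1) = ((k + 1 : Nat) : Int) by push_cast; ring]
  rw [PySem.List.slice_natCast]
  simp [PySem.List.slice_zero_start, PySem.List.slice_to_natCast]

theorem is_line_safe_true (l : List Int)
    (hu : ¬ (dts l).all upP = true) (hd : ¬ (dts l).all downP = true) :
    is_line_safe l true = (List.range l.length).any (condA l) := by
  rw [is_line_safe, dts_eq_zipWith]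
  rw [if_neg (by simpa [upP] using hu), if_neg (by simpa [downP] using hd), dif_pos rfl]
  rw [PySem.List.pyRange_one]
  simp only [Int.sub_zero, Int.toNat_natCast, List.any_map, Function.comp_def, zero_add]
  apply PySem.List.any_congr_mem
  intro k _
  rw [sliceRem, is_line_safe_false]
  rfl

-- invariant of Source B's final scan: running prefix flags, remaining indices
theorem altLoop_spec (n : Nat) (d : List Int) (up down su sd : List Bool)
    (hup : up.length + 1 = n) (hdown : down.length + 1 = n)
    (cond : Nat → Bool)
    (hcond : ∀ j, j < n → cond j =
      (if j = 0 then su.getD 1 false || sd.getD 1 false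
       else if j = n - 1 then (up.take (j - 1)).all id || (down.take (j - 1)).all id
       else
         let merged := d.getD (j - 1) 0 + d.getD j 0
         ((up.take (j - 1)).all id && (decide (1 ≤ merged) && decide (merged ≤ 3)) && su.getD (j + 1) false) ||
         ((down.take (j - 1)).all id && (decide (-3 ≤ merged) && decide (merged ≤ -1)) && sd.getD (j + 1) false))) :
    ∀ cnt j, n - j = cnt → j ≤ n →
      altLoop n d up down su sd j ((up.take (j - 1)).all id) ((down.take (j - 1)).all id) =
        (List.range' j (n - j)).any cond := by
  intro cnt
  induction cnt with
  | zero =>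
    intro j h1 h2
    have hj : j = n := by omega
    subst hj
    rw [altLoop]
    simp [h1]
  | succ cnt ih =>
    intro j h1 h2
    have hjn : j < n := by omega
    rw [altLoop, if_pos hjn]
    have hrange : List.range' j (n - j) = j :: List.range' (j + 1) (n - (j + 1)) := by
      rw [show n - j = (n - (j + 1)) + 1 by omega]
      rfl
    rw [hrange]
    simp only [List.any_cons]
    rw [← hcond j hjn]
    by_cases hok : cond j = true
    · simp [hok]
    · have hpu : (if 1 ≤ j then (up.take (j - 1)).all id && up.getD (j - 1) false
          else (up.take (j - 1)).all id) = (up.take ((j + 1) - 1)).all id := by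
        rcases Nat.eq_zero_or_pos j with hj0 | hj0
        · subst hj0; simp
        · rw [if_pos (show 1 ≤ j by omega)]
          have hlt : j - 1 < up.length := by omega
          rw [Nat.add_sub_cancel, show j = (j - 1) + 1 by omega, Nat.add_sub_cancel,
            List.take_add_one, List.getElem?_eq_getElem hlt, Option.toList_some,
            List.all_append, List.all_cons, List.all_nil,
            List.getD_eq_getElem?_getD, List.getElem?_eq_getElem hlt]
          simp
      have hpd : (if 1 ≤ j then (down.take (j - 1)).all id && down.getD (j - 1) false
          else (down.take (j - 1)).all id) = (down.take ((j + 1) - 1)).all id := by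
        rcases Nat.eq_zero_or_pos j with hj0 | hj0
        · subst hj0; simp
        · rw [if_pos (show 1 ≤ j by omega)]
          have hlt : j - 1 < down.length := by omega
          rw [Nat.add_sub_cancel, show j = (j - 1) + 1 by omega, Nat.add_sub_cancel,
            List.take_add_one, List.getElem?_eq_getElem hlt, Option.toList_some,
            List.all_append, List.all_cons, List.all_nil,
            List.getD_eq_getElem?_getD, List.getElem?_eq_getElem hlt]
          simp
      simp only [hok, Bool.false_eq_true, if_false, Bool.false_or, hpu, hpd]
      exact ih (j + 1) (by omega) (by omega)

-- Source B's table test at index k equals A's re-check of the list with k removed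
theorem cond_eq (l : List Int) (k : Nat) (hn : 2 ≤ l.length) (hk : k < l.length) :
    condA l k =
      (if k = 0 then (sufList ((dts l).map upP)).getD 1 false || (sufList ((dts l).map downP)).getD 1 false
       else if k = l.length - 1 then
         (((dts l).map upP).take (k - 1)).all id || (((dts l).map downP).take (k - 1)).all id
       else
         let merged := (dts l).getD (k - 1) 0 + (dts l).getD k 0
         ((((dts l).map upP).take (k - 1)).all id && (decide (1 ≤ merged) && decide (merged ≤ 3)) && (sufList ((dts l).map upP)).getD (k + 1) false) ||
         ((((dts l).map downP).take (k - 1)).all id && (decide (-3 ≤ merged) && decide (merged ≤ -1)) && (sufList ((dts l).map downP)).getD (k + 1) false)) := by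
  have hlen := length_dts l
  rcases Nat.eq_zero_or_pos k with hk0 | hk1
  · subst hk0
    rw [if_pos rfl]
    rw [sufList_getD _ 1 (by simp [hlen]; omega), sufList_getD _ 1 (by simp [hlen]; omega)]
    obtain ⟨a, b, t, rfl⟩ : ∃ a b t, l = a :: b :: t := by
      match l, hn with
      | a :: b :: t, _ => exact ⟨a, b, t, rfl⟩
    simp only [condA, List.take_zero, List.drop_succ_cons, List.drop_zero, List.nil_append]
    rw [dts_tail a b t]
    simp [List.all_map, ← List.map_tail, Function.comp_def]
  · rw [if_neg (by omega)]
    by_cases hlast : k = l.length - 1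
    · rw [if_pos hlast]
      have hdrop : l.drop (k + 1) = [] := List.drop_eq_nil_of_le (by omega)
      have htake : l.take k = l.dropLast := by
        rw [List.dropLast_eq_take, hlast]
      simp only [condA, hdrop, List.append_nil, htake, dts_dropLast]
      rw [List.dropLast_eq_take]
      simp [hlen, List.all_map, ← List.map_take, Function.comp_def,
        show l.length - 1 - 1 = l.length - 2 by omega,
        show l.length - 2 = k - 1 by omega]
    · rw [if_neg hlast]
      have hk2 : k + 1 < l.length := by omega
      simp only [condA]
      rw [dts_removal l k hk1 hk2]
      rw [sufList_getD _ (k + 1) (by simp [hlen]; omega),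
        sufList_getD _ (k + 1) (by simp [hlen]; omega)]
      simp [List.all_append, List.all_map, ← List.map_take, ← List.map_drop,
        Function.comp_def, upP, downP, Bool.and_assoc]

theorem dts_nil_of_short (l : List Int) (h : l.length ≤ 1) : dts l = [] := by
  match l, h with
  | [], _ => rfl
  | [a], _ => rfl

-- ===== VERDICT (by name: the statement is the Claim_ definition above) =====
theorem is_line_safe_spec : Claim_equal_is_line_safe := by
  intro line try_removing _
  unfold Spec_is_line_safe
  simp only [is_line_safe_alt, dts_eq_rangeMap,
    show (fun d : Int => decide (1 ≤ d) && decide (d ≤ 3)) = upP from rfl,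
    show (fun d : Int => decide (-3 ≤ d) && decide (d ≤ -1)) = downP from rfl]
  by_cases hu : (dts line).all upP = true
  · have h1 : ((dts line).map upP).all id = true := by
      simpa [List.all_map, Function.comp_def] using hu
    rw [h1]
    simp only [Bool.true_or, if_true]
    cases try_removing with
    | false => rw [is_line_safe_false, hu]; simp
    | true => rw [is_line_safe, dts_eq_zipWith, if_pos (by simpa [upP] using hu)]
  · by_cases hd : (dts line).all downP = true
    · have h1 : ((dts line).map downP).all id = true := by
        simpa [List.all_map, Function.comp_def] using hd
      rw [h1]
      simp only [Bool.or_true, if_true]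
      cases try_removing with
      | false => rw [is_line_safe_false, hd]; simp
      | true =>
        rw [is_line_safe, dts_eq_zipWith, if_neg (by simpa [upP] using hu),
          if_pos (by simpa [downP] using hd)]
    · have h1 : ((dts line).map upP).all id = false := by
        rw [Bool.eq_false_iff]
        intro hc
        exact hu (by simpa [List.all_map, Function.comp_def] using hc)
      have h2 : ((dts line).map downP).all id = false := by
        rw [Bool.eq_false_iff]
        intro hc
        exact hd (by simpa [List.all_map, Function.comp_def] using hc)
      rw [h1, h2]
      simp only [Bool.or_false, Bool.false_eq_true, if_false]
      cases try_removing with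
      | false =>
        rw [is_line_safe_false]
        simp only [Bool.not_eq_true] at hu hd
        rw [hu, hd]; rfl
      | true =>
        have hn2 : 2 ≤ line.length := by
          by_contra hc
          exact hu (by rw [dts_nil_of_short line (by omega)]; rfl)
        simp only [Bool.not_true, Bool.false_eq_true, if_false,
          suffixAll_eq_sufList]
        rw [is_line_safe_true line hu hd]
        have hlen := length_dts line
        have := altLoop_spec line.length (dts line)
          ((dts line).map upP) ((dts line).map downP)
          (sufList ((dts line).map upP)) (sufList ((dts line).map downP))
          (by simp [hlen]; omega) (by simp [hlen]; omega)
          (condA line)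
          (fun j hj => cond_eq line j hn2 hj)
          line.length 0 (by omega) (by omega)
        simp only [List.take_zero, List.all_nil, Nat.sub_zero] at this
        rw [List.range_eq_range']
        exact this.symm
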